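-- pv_equiv track=rewrite | github.com/ICCAD-2024/Demotic | src/ISCAS_comb_parser.py | parse_verilog_module
-- ===== SOURCE A (Python) =====
-- def parse_verilog_module(verilog_code):
--     lines = verilog_code.split('\n')
--     inputs = []
--     outputs = []
--     registers = []
--
--     for line in lines:
--
--         if 'INPUT' in line:
--             if line.startswith('INPUT('):
--                 # Extract the variable name between parentheses
--                 variable = line.split('(')[1].split(')')[0].replace('.', '')
--                 inputs.append(variable)
--         elif 'OUTPUT' in line:
--             if line.startswith('OUTPUT('):
--                 # Extract the variable name between parentheses
--                 variable = line.split('(')[1].split(')')[0].replace('.', '')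
--                 outputs.append(variable)
--         elif 'DFF' in line:
--             variable = line.split('=')[0].strip().replace('.', '')
--             registers.append(variable)
--     return inputs, outputs, registers
-- ===== SOURCE B (Python) =====
-- def _paren_name(line):
--     return line.split('(')[1].split(')')[0].replace('.', '')
--
--
-- def parse_verilog_module(verilog_code):
--     lines = verilog_code.split('\n')
--     inputs = [_paren_name(l) for l in lines if l.startswith('INPUT(')]
--     outputs = [_paren_name(l) for l in lines
--                if 'INPUT' not in l and l.startswith('OUTPUT(')]
--     registers = [l.split('=')[0].strip().replace('.', '') for l in lines
--                  if 'INPUT' not in l and 'OUTPUT' not in l and 'DFF' in l]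
--     return inputs, outputs, registers
-- ===== Notes on version B (the rewrite author's own statement) =====
-- stated objective: simpler
-- what changed: Replaces the single fused loop with an elif-chain and three mutable accumulators by three independent comprehension passes, one per output list, with the branch exclusivity made explicit in each filter.
import Mathlib
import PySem

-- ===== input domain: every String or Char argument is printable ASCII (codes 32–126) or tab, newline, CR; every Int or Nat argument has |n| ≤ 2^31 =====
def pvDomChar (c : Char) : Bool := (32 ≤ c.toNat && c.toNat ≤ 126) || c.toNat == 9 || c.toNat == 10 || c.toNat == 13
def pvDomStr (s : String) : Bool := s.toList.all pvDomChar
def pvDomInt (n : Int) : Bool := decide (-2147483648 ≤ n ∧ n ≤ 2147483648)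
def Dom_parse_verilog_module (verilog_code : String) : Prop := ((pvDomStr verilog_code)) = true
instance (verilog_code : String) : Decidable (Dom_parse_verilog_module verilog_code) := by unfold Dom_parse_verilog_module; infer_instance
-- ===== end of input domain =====

-- B replaces A's single fused elif-chain loop with three independent filter+map passes,
-- one per result list (objective: simpler). Return values proved equal on all inputs.

-- line.split('(')[1].split(')')[0].replace('.', '')   (both Pythons compute this expression;
-- the [1]/[0] indexes are only reached under a startswith guard that makes them in range,
-- so the Python never raises there and the pyGetD default is never used)
def pvParenName (line : String) : String :=
  PySem.Str.replace
    (PySem.List.pyGetD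
      ((PySem.Str.split? (PySem.List.pyGetD ((PySem.Str.split? line "(").getD []) 1 "") ")").getD [])
      0 "")
    "." ""

-- line.split('=')[0].strip().replace('.', '')   (split always yields a nonempty list, index 0 is safe)
def pvEqName (line : String) : String :=
  PySem.Str.replace
    (PySem.Str.strip (PySem.List.pyGetD ((PySem.Str.split? line "=").getD []) 0 ""))
    "." ""

-- ===== PORT A =====
def parse_verilog_module (verilog_code : String) : List String × List String × List String :=
  let lines := (PySem.Str.split? verilog_code "\n").getD []
  lines.foldl
    (fun acc line =>
      if PySem.Str.isIn "INPUT" line then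
        if PySem.Str.startswith line "INPUT(" then
          (acc.1 ++ [pvParenName line], acc.2.1, acc.2.2)
        else acc
      else if PySem.Str.isIn "OUTPUT" line then
        if PySem.Str.startswith line "OUTPUT(" then
          (acc.1, acc.2.1 ++ [pvParenName line], acc.2.2)
        else acc
      else if PySem.Str.isIn "DFF" line then
        (acc.1, acc.2.1, acc.2.2 ++ [pvEqName line])
      else acc)
    ([], [], [])

-- ===== PORT B =====
def parse_verilog_module_alt (verilog_code : String) : List String × List String × List String :=
  let lines := (PySem.Str.split? verilog_code "\n").getD []
  let inputs := (lines.filter (fun l => PySem.Str.startswith l "INPUT(")).map pvParenName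
  let outputs := (lines.filter (fun l =>
      !PySem.Str.isIn "INPUT" l && PySem.Str.startswith l "OUTPUT(")).map pvParenName
  let registers := (lines.filter (fun l =>
      !PySem.Str.isIn "INPUT" l && !PySem.Str.isIn "OUTPUT" l && PySem.Str.isIn "DFF" l)).map pvEqName
  (inputs, outputs, registers)

-- ===== PRECONDITION & SPEC =====
def Spec_parse_verilog_module (verilog_code : String) (out : List String × List String × List String) : Prop := out = parse_verilog_module_alt verilog_code
instance (verilog_code : String) (out : List String × List String × List String) : Decidable (Spec_parse_verilog_module verilog_code out) := by unfold Spec_parse_verilog_module; infer_instance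

-- ===== CLAIM (what is proved, stated in full; the proofs are below) =====
def Claim_equal_parse_verilog_module : Prop := ∀ (verilog_code : String), Dom_parse_verilog_module verilog_code → Spec_parse_verilog_module verilog_code (parse_verilog_module verilog_code)

-- ===== LEMMAS AND PROOFS =====

theorem pv_not_true {b : Bool} (h : b = false) : ¬ b = true := by simp [h]

-- a line starting with "INPUT(" contains "INPUT" (so A's outer branch is then taken)
theorem pv_sw_input {l : String} (h : PySem.Str.startswith l "INPUT(" = true) :
    PySem.Str.isIn "INPUT" l = true := by
  rw [PySem.Str.isIn_iff_infix]
  have hp : "INPUT(".toList <+: l.toList := by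
    rw [← PySem.Chars.startswith_iff]; simpa using h
  exact ((show ("INPUT".toList <+: "INPUT(".toList) by decide).trans hp).isInfix

theorem pv_sw_output {l : String} (h : PySem.Str.startswith l "OUTPUT(" = true) :
    PySem.Str.isIn "OUTPUT" l = true := by
  rw [PySem.Str.isIn_iff_infix]
  have hp : "OUTPUT(".toList <+: l.toList := by
    rw [← PySem.Chars.startswith_iff]; simpa using h
  exact ((show ("OUTPUT".toList <+: "OUTPUT(".toList) by decide).trans hp).isInfix

-- loop invariant: A's fold over any line list, from any accumulator, appends exactly
-- B's three filtered/mapped lists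
theorem pv_fold_eq (ls : List String) :
    ∀ (ins outs regs : List String),
    ls.foldl
      (fun acc line =>
        if PySem.Str.isIn "INPUT" line then
          if PySem.Str.startswith line "INPUT(" then
            (acc.1 ++ [pvParenName line], acc.2.1, acc.2.2)
          else acc
        else if PySem.Str.isIn "OUTPUT" line then
          if PySem.Str.startswith line "OUTPUT(" then
            (acc.1, acc.2.1 ++ [pvParenName line], acc.2.2)
          else acc
        else if PySem.Str.isIn "DFF" line then
          (acc.1, acc.2.1, acc.2.2 ++ [pvEqName line])
        else acc)
      (ins, outs, regs) =
    (ins ++ (ls.filter (fun l => PySem.Str.startswith l "INPUT(")).map pvParenName,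
     outs ++ (ls.filter (fun l =>
        !PySem.Str.isIn "INPUT" l && PySem.Str.startswith l "OUTPUT(")).map pvParenName,
     regs ++ (ls.filter (fun l =>
        !PySem.Str.isIn "INPUT" l && !PySem.Str.isIn "OUTPUT" l && PySem.Str.isIn "DFF" l)).map pvEqName) := by
  induction ls with
  | nil => intro ins outs regs; simp
  | cons l t ih =>
    intro ins outs regs
    simp only [List.foldl_cons, List.filter_cons]
    by_cases hI : PySem.Str.isIn "INPUT" l = true
    · have hcO : (!PySem.Str.isIn "INPUT" l && PySem.Str.startswith l "OUTPUT(") = false := by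
        rw [hI]; rfl
      have hcR : (!PySem.Str.isIn "INPUT" l && !PySem.Str.isIn "OUTPUT" l && PySem.Str.isIn "DFF" l) = false := by
        rw [hI]; rfl
      rw [if_pos hI, if_neg (pv_not_true hcO), if_neg (pv_not_true hcR)]
      by_cases hsI : PySem.Str.startswith l "INPUT(" = true
      · rw [if_pos hsI, if_pos hsI, ih]
        simp only [List.map_cons, List.append_assoc, List.singleton_append]
      · rw [if_neg hsI, if_neg hsI, ih]
    · have hIf : PySem.Str.isIn "INPUT" l = false := Bool.eq_false_iff.mpr hI
      have hnsI : ¬ PySem.Str.startswith l "INPUT(" = true := fun h => hI (pv_sw_input h)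
      rw [if_neg hI, if_neg hnsI]
      by_cases hO : PySem.Str.isIn "OUTPUT" l = true
      · have hcR : (!PySem.Str.isIn "INPUT" l && !PySem.Str.isIn "OUTPUT" l && PySem.Str.isIn "DFF" l) = false := by
          rw [hO, hIf]; rfl
        rw [if_pos hO, if_neg (pv_not_true hcR)]
        by_cases hsO : PySem.Str.startswith l "OUTPUT(" = true
        · have hcO : (!PySem.Str.isIn "INPUT" l && PySem.Str.startswith l "OUTPUT(") = true := by
            rw [hIf, hsO]; rfl
          rw [if_pos hsO, if_pos hcO, ih]
          simp only [List.map_cons, List.append_assoc, List.singleton_append]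
        · have hcO : (!PySem.Str.isIn "INPUT" l && PySem.Str.startswith l "OUTPUT(") = false := by
            rw [hIf, Bool.eq_false_iff.mpr hsO]; rfl
          rw [if_neg hsO, if_neg (pv_not_true hcO), ih]
      · have hOf : PySem.Str.isIn "OUTPUT" l = false := Bool.eq_false_iff.mpr hO
        have hnsO : ¬ PySem.Str.startswith l "OUTPUT(" = true := fun h => hO (pv_sw_output h)
        have hcO : (!PySem.Str.isIn "INPUT" l && PySem.Str.startswith l "OUTPUT(") = false := by
          rw [hIf, Bool.eq_false_iff.mpr hnsO]; rfl
        rw [if_neg hO, if_neg (pv_not_true hcO)]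
        by_cases hD : PySem.Str.isIn "DFF" l = true
        · have hcR : (!PySem.Str.isIn "INPUT" l && !PySem.Str.isIn "OUTPUT" l && PySem.Str.isIn "DFF" l) = true := by
            rw [hIf, hOf, hD]; rfl
          rw [if_pos hD, if_pos hcR, ih]
          simp only [List.map_cons, List.append_assoc, List.singleton_append]
        · have hcR : (!PySem.Str.isIn "INPUT" l && !PySem.Str.isIn "OUTPUT" l && PySem.Str.isIn "DFF" l) = false := by
            rw [hIf, hOf, Bool.eq_false_iff.mpr hD]; rfl
          rw [if_neg hD, if_neg (pv_not_true hcR), ih]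

-- ===== VERDICT (by name: the statement is the Claim_ definition above) =====
theorem parse_verilog_module_spec : Claim_equal_parse_verilog_module := by
  intro verilog_code _
  unfold Spec_parse_verilog_module parse_verilog_module parse_verilog_module_alt
  exact pv_fold_eq _ [] [] []
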